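-- pv_equiv track=rewrite | github.com/lzsiga/hello-world | lc_formstd.py | redundantBracket
-- ===== SOURCE A (Python) =====
-- def redundantBracket(s):
--     slen= len(s)
--     i= 0
--     depth= 0
--     while i<slen and s[i]=='(':
--         i += 1
--         depth += 1
--     if i+1 >= slen or depth==0 or s[i]==')' or s[i+1]!=')':
--         return -1
--     i += 1
--     maxdepth= depth
--     while i<slen and s[i]==')' and depth>0:
--         i += 1
--         depth -= 1
--     if depth==0:
--         return maxdepth
--     else:
--         return -1
-- ===== SOURCE B (Python) =====
-- import re
--
-- _PAT = re.compile(r'(\(+)[^()](\)+)')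
--
-- def redundantBracket(s):
--     m = _PAT.match(s)
--     if not m:
--         return -1
--     opens = len(m.group(1))
--     closes = len(m.group(2))
--     return opens if closes >= opens else -1
-- ===== Notes on version B (the rewrite author's own statement) =====
-- stated objective: idiomatic
-- what changed: Replaced A's two manual index/depth while-loops and multi-condition guard with a single regex match r'(\(+)[^()](\)+)' whose greedy groups capture the opener and closer runs, returning opens if closes >= opens else -1.
import Mathlib
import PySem

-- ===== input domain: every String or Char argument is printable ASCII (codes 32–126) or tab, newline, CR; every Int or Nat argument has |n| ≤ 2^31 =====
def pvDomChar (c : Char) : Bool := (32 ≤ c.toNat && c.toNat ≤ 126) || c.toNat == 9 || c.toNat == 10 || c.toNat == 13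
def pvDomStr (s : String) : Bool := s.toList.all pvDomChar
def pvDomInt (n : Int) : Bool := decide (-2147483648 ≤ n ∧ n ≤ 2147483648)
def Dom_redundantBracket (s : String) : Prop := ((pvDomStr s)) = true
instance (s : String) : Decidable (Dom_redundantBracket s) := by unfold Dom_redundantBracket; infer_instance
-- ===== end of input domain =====

-- B replaces A's two manual index/depth while-loops by a single regex prefix match
-- (maximal '(' run, one non-paren char, maximal ')' run, compare run lengths): objective = idiomatic.

-- ===== PORT A =====
-- first while loop: consume leading '(' advancing i / incrementing depth
def pvALoop1 : List Char → Int → List Char × Int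
  | c :: t, d => if c = '(' then pvALoop1 t (d + 1) else (c :: t, d)
  | [], d => ([], d)

-- second while loop: consume ')' while depth > 0, decrementing depth
def pvALoop2 : List Char → Int → Int
  | c :: t, d => if c = ')' ∧ d > 0 then pvALoop2 t (d - 1) else d
  | [], d => d

def redundantBracket (s : String) : Int :=
  let r := pvALoop1 s.toList 0
  match r.1 with
  | c :: c2 :: t =>
    if r.2 = 0 ∨ c = ')' ∨ c2 ≠ ')' then -1
    else if pvALoop2 (c2 :: t) r.2 = 0 then r.2 else -1
  | _ => -1

-- ===== PORT B =====
-- transcription of the regex match r'(\(+)[^()](\)+)': greedy '('-run, one char that is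
-- neither '(' nor ')', greedy ')'-run (the greedy groups never backtrack usefully here,
-- since [^()] cannot absorb a paren); no match → -1, else opens if closes ≥ opens else -1
def redundantBracket_alt (s : String) : Int :=
  let cs := s.toList
  let opens := cs.takeWhile (· = '(')
  match cs.dropWhile (· = '(') with
  | c :: t =>
    if opens.length = 0 ∨ c = '(' ∨ c = ')' then -1
    else
      let closes := t.takeWhile (· = ')')
      if opens.length ≤ closes.length then (opens.length : Int) else -1
  | [] => -1

-- ===== PRECONDITION & SPEC =====
def Spec_redundantBracket (s : String) (out : Int) : Prop := out = redundantBracket_alt s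
instance (s : String) (out : Int) : Decidable (Spec_redundantBracket s out) := by unfold Spec_redundantBracket; infer_instance

-- ===== CLAIM (what is proved, stated in full; the proofs are below) =====
def Claim_equal_redundantBracket : Prop := ∀ (s : String), Dom_redundantBracket s → Spec_redundantBracket s (redundantBracket s)

-- ===== LEMMAS AND PROOFS =====

-- the head of (dropWhile p) never satisfies p
theorem head_dropWhile_neg {p : Char → Prop} [DecidablePred p] (cs : List Char) (c : Char)
    (t : List Char) (h : cs.dropWhile (fun x => decide (p x)) = c :: t) : ¬ p c := by
  induction cs with
  | nil => simp at h
  | cons a u ih =>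
      by_cases ha : p a
      · rw [List.dropWhile_cons_of_pos (by simpa using ha)] at h; exact ih h
      · rw [List.dropWhile_cons_of_neg (by simpa using ha)] at h
        cases h; assumption

-- loop 1 splits off the maximal '(' prefix and adds its length to d
theorem pvALoop1_eq (cs : List Char) (d : Int) :
    pvALoop1 cs d = (cs.dropWhile (· = '('), d + (cs.takeWhile (· = '(')).length) := by
  induction cs generalizing d with
  | nil => simp [pvALoop1]
  | cons c t ih =>
      by_cases h : c = '('
      · simp [pvALoop1, h, ih]; ring
      · simp [pvALoop1, h]

-- loop 2 subtracts min d (length of the leading ')' run) from d, for 0 ≤ d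
theorem pvALoop2_eq (cs : List Char) (d : Int) (hd : 0 ≤ d) :
    pvALoop2 cs d = d - min d ((cs.takeWhile (· = ')')).length : Int) := by
  induction cs generalizing d with
  | nil => simp [pvALoop2]; omega
  | cons c t ih =>
      by_cases hc : c = ')'
      · by_cases hdz : d = 0
        · subst hdz; simp [pvALoop2, hc]; omega
        · have hpos : d > 0 := lt_of_le_of_ne hd (Ne.symm hdz)
          have h := ih (d - 1) (by omega)
          simp [pvALoop2, hc, hpos, h]; omega
      · simp [pvALoop2, hc]; omega

-- ===== VERDICT (by name: the statement is the Claim_ definition above) =====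
theorem redundantBracket_spec : Claim_equal_redundantBracket := by
  intro s _
  unfold Spec_redundantBracket redundantBracket redundantBracket_alt
  cases hrest : s.toList.dropWhile (· = '(') with
  | nil => simp only [pvALoop1_eq, zero_add, hrest]
  | cons c t2 =>
      have hcne : ¬ (c = '(') :=
        head_dropWhile_neg (p := fun x => x = '(') s.toList c t2 (by simpa using hrest)
      cases t2 with
      | nil =>
          simp only [pvALoop1_eq, zero_add, hrest]
          split_ifs with h1 h2 <;> simp_all
      | cons c2 t =>
          have h2 := pvALoop2_eq (c2 :: t)
            ((s.toList.takeWhile (· = '(')).length : Int) (by positivity)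
          simp only [pvALoop1_eq, zero_add, hrest, h2]
          by_cases hc2 : c2 = ')'
          · rw [List.takeWhile_cons_of_pos (by simpa using hc2)]
            split_ifs <;> simp_all <;> omega
          · rw [List.takeWhile_cons_of_neg (by simpa using hc2)]
            split_ifs <;> simp_all
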